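-- pv_equiv track=rewrite | github.com/ejfn/advent-of-code | 2016/13/day13.py | solve_bfs
-- ===== SOURCE A (Python) =====
-- from collections import deque
--
-- def is_wall(x, y, fav_num):
--     val = x*x + 3*x + 2*x*y + y + y*y + fav_num
--     # count bits
--     bits = bin(val).count('1')
--     return bits % 2 != 0
--
-- def solve_bfs(fav_num, target_x, target_y):
--     # Queue: (x, y, dist)
--     queue = deque([(1, 1, 0)])
--     visited = set([(1, 1)])
--
--     while queue:
--         x, y, dist = queue.popleft()
--
--         if x == target_x and y == target_y:
--             return dist
--
--         # Neighbors
--         for dx, dy in [(0, 1), (0, -1), (1, 0), (-1, 0)]: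
--             nx, ny = x + dx, y + dy
--
--             if nx < 0 or ny < 0:
--                 continue
--
--             if (nx, ny) in visited:
--                 continue
--
--             if is_wall(nx, ny, fav_num):
--                 continue
--
--             visited.add((nx, ny))
--             queue.append((nx, ny, dist + 1))
--
--     return -1
-- ===== SOURCE B (Python) =====
-- def solve_bfs(fav_num, target_x, target_y):
--     # Set-saturation BFS: no queue and no per-node bookkeeping; each round maps
--     # the whole frontier SET to the set of its open neighbours and subtracts the
--     # cells already seen, counting rounds.
--     def open_neighbours(cells):
--         return {(nx, ny)
--                 for (x, y) in cells
--                 for (nx, ny) in ((x, y + 1), (x, y - 1), (x + 1, y), (x - 1, y))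
--                 if nx >= 0 and ny >= 0
--                 and bin(nx*nx + 3*nx + 2*nx*ny + ny + ny*ny + fav_num).count('1') % 2 == 0}
--     seen = set()
--     frontier = {(1, 1)}
--     dist = 0
--     while frontier:
--         if (target_x, target_y) in frontier:
--             return dist
--         seen |= frontier
--         frontier = open_neighbours(frontier) - seen
--         dist += 1
--     return -1
-- ===== Notes on version B (the rewrite author's own statement) =====
-- stated objective: alternative
-- what changed: Replaces the deque-of-(x,y,dist)-triples BFS with per-neighbour visited-marking by a queue-free set-saturation fixpoint: each round maps the entire frontier SET through a set comprehension of its open neighbours and subtracts the seen set wholesale, so there is no queue, no per-node distance and no per-neighbour visited test, only whole-set union/difference and a round counter.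
import Mathlib
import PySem

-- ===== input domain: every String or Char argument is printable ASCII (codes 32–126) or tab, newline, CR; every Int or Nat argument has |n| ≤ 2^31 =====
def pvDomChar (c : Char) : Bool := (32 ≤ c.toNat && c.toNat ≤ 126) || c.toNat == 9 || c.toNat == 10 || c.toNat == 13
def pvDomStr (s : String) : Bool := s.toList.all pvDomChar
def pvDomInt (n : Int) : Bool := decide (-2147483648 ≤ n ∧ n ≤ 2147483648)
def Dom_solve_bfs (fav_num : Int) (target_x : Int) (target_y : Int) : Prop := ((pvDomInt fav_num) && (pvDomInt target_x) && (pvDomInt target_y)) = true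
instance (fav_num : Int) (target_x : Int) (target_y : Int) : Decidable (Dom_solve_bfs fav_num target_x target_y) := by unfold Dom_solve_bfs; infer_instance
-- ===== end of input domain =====

-- B replaces A's deque-of-triples BFS (pop one node, test four neighbours against a
-- visited set, push survivors with dist+1) by a queue-free set-saturation fixpoint:
-- whole-frontier set comprehension of open neighbours minus the seen set, plus a round
-- counter; objective: alternative. Both unbounded 'while' loops are made total with a
-- fuel guard of 2^32 BFS levels.

-- ===== PORT A =====
def is_wall (x : Int) (y : Int) (fav_num : Int) : Bool :=
  let val := x*x + 3*x + 2*x*y + y + y*y + fav_num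
  let bits := PySem.Int.bitCount val
  bits % 2 != 0

-- A's inner 'for dx, dy in …' body: skip guards in A's order, else mark visited, enqueue
def bfsStepA (fav_num : Int) (x : Int) (y : Int) (dist : Int)
    (st : List (Int × Int × Int) × PySem.Set (Int × Int)) (dxy : Int × Int) :
    List (Int × Int × Int) × PySem.Set (Int × Int) :=
  let nx := x + dxy.1
  let ny := y + dxy.2
  if nx < 0 ∨ ny < 0 then st
  else if PySem.Set.contains st.2 (nx, ny) then st
  else if is_wall nx ny fav_num then st
  else (st.1 ++ [(nx, ny, dist + 1)], PySem.Set.add st.2 (nx, ny))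

-- termination helper for the fuel guard of A's loop: within a level the expansion only
-- appends entries whose dist is d+1, so the number of queue entries at dist ≤ d drops
theorem countA_step (fav_num x y d curd : Int) (h : ¬ (d + 1 ≤ curd))
    (st : List (Int × Int × Int) × PySem.Set (Int × Int)) (dxy : Int × Int) :
    ((bfsStepA fav_num x y d st dxy).1.countP (fun t => decide (t.2.2 ≤ curd)))
      = st.1.countP (fun t => decide (t.2.2 ≤ curd)) := by
  simp only [bfsStepA]
  split_ifs <;> simp [h]

theorem countA_fold (fav_num x y d curd : Int) (h : ¬ (d + 1 ≤ curd))
    (st : List (Int × Int × Int) × PySem.Set (Int × Int)) (l : List (Int × Int)) :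
    ((List.foldl (bfsStepA fav_num x y d) st l).1.countP (fun t => decide (t.2.2 ≤ curd)))
      = st.1.countP (fun t => decide (t.2.2 ≤ curd)) := by
  induction l generalizing st with
  | nil => rfl
  | cons a l ih => rw [List.foldl_cons, ih, countA_step fav_num x y d curd h]

-- A's 'while queue:' — the fuel guard charges one unit per LEVEL (dist increase of the
-- head), never inside a level, so both ports cut off at exactly the same level
def bfsLoopA (fav_num : Int) (target_x : Int) (target_y : Int) :
    Nat → Int → List (Int × Int × Int) → PySem.Set (Int × Int) → Int
  | _, _, [], _ => -1
  | fuel, curd, (x, y, d) :: rest, visited =>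
    if hd : d = curd then
      if x = target_x ∧ y = target_y then d
      else
        let st := List.foldl (bfsStepA fav_num x y d) (rest, visited)
          [((0:Int), (1:Int)), (0, -1), (1, 0), (-1, 0)]
        bfsLoopA fav_num target_x target_y fuel curd st.1 st.2
    else
      match fuel with
      | 0 => -1
      | f + 1 => bfsLoopA fav_num target_x target_y f d ((x, y, d) :: rest) visited
  termination_by fuel curd q _ => (fuel, q.countP (fun t => decide (t.2.2 ≤ curd)))
  decreasing_by
  · apply Prod.Lex.right
    rw [countA_fold fav_num x y d curd (by omega)]
    simp [hd]
  · apply Prod.Lex.left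
    omega

def solve_bfs (fav_num : Int) (target_x : Int) (target_y : Int) : Int :=
  bfsLoopA fav_num target_x target_y 4294967296 0
    [((1:Int), (1:Int), (0:Int))] (PySem.Set.ofList [((1:Int), (1:Int))])

-- ===== PORT B =====
-- the membership condition of B's set comprehension
def open_ok (fav_num : Int) (n : Int × Int) : Bool :=
  decide (0 ≤ n.1) && decide (0 ≤ n.2) &&
    (PySem.Int.bitCount (n.1*n.1 + 3*n.1 + 2*n.1*n.2 + n.2 + n.2*n.2 + fav_num) % 2 == 0)

-- B's '{(nx, ny) for (x, y) in cells for (nx, ny) in … if …}': build a Set from the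
-- generated candidates that pass the condition (the result, a Set, is order-independent)
def open_neighbours (fav_num : Int) (cells : PySem.Set (Int × Int)) : PySem.Set (Int × Int) :=
  cells.foldl
    (fun s c => [(c.1, c.2 + 1), (c.1, c.2 - 1), (c.1 + 1, c.2), (c.1 - 1, c.2)].foldl
      (fun s n => if open_ok fav_num n then PySem.Set.add s n else s) s)
    PySem.Set.empty

-- B's 'while frontier:' — same fuel guard, one unit per round (= level)
def bfsLoopB (fav_num : Int) (target_x : Int) (target_y : Int) :
    Nat → PySem.Set (Int × Int) → PySem.Set (Int × Int) → Int → Int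
  | fuel, seen, frontier, dist =>
    if frontier.isEmpty then -1
    else if PySem.Set.contains frontier (target_x, target_y) then dist
    else
      match fuel with
      | 0 => -1
      | f + 1 =>
        bfsLoopB fav_num target_x target_y f (PySem.Set.union seen frontier)
          (PySem.Set.diff (open_neighbours fav_num frontier) (PySem.Set.union seen frontier))
          (dist + 1)
  termination_by fuel _ _ _ => fuel

def solve_bfs_alt (fav_num : Int) (target_x : Int) (target_y : Int) : Int :=
  bfsLoopB fav_num target_x target_y 4294967296 PySem.Set.empty
    (PySem.Set.ofList [((1:Int), (1:Int))]) 0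

-- ===== PRECONDITION & SPEC =====
def Spec_solve_bfs (fav_num : Int) (target_x : Int) (target_y : Int) (out : Int) : Prop := out = solve_bfs_alt fav_num target_x target_y
instance (fav_num : Int) (target_x : Int) (target_y : Int) (out : Int) : Decidable (Spec_solve_bfs fav_num target_x target_y out) := by unfold Spec_solve_bfs; infer_instance

-- ===== CLAIM (what is proved, stated in full; the proofs are below) =====
def Claim_equal_solve_bfs : Prop := ∀ (fav_num : Int) (target_x : Int) (target_y : Int), Dom_solve_bfs fav_num target_x target_y → Spec_solve_bfs fav_num target_x target_y (solve_bfs fav_num target_x target_y)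

-- ===== LEMMAS AND PROOFS =====

-- a cell's four neighbour candidates, in the common generation order of both programs
def nbrs (c : Int × Int) : List (Int × Int) :=
  [(c.1, c.2 + 1), (c.1, c.2 - 1), (c.1 + 1, c.2), (c.1 - 1, c.2)]

-- abstract per-candidate step of A's expansion, acting on (next-level cells, visited)
def stepCell (fav_num : Int) (p : List (Int × Int) × PySem.Set (Int × Int)) (n : Int × Int) :
    List (Int × Int) × PySem.Set (Int × Int) :=
  if open_ok fav_num n = true ∧ ¬ (n ∈ p.2) then (p.1 ++ [n], PySem.Set.add p.2 n) else p

def expandCell (fav_num : Int) (p : List (Int × Int) × PySem.Set (Int × Int)) (c : Int × Int) :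
    List (Int × Int) × PySem.Set (Int × Int) :=
  List.foldl (stepCell fav_num) p (nbrs c)

-- A's wall test and guards agree with B's comprehension condition
theorem wall_open (fav_num nx ny : Int) :
    open_ok fav_num (nx, ny) = true ↔ (¬ (nx < 0 ∨ ny < 0) ∧ ¬ is_wall nx ny fav_num = true) := by
  simp only [open_ok, is_wall, Bool.and_eq_true, decide_eq_true_eq, bne_iff_ne, ne_eq,
    beq_iff_eq, not_or, not_not, not_lt]

-- one neighbour candidate, A's step seen through stepCell (queue prefix P untouched)
theorem step_rel (fav_num x y d dx dy nx ny : Int) (hx : nx = x + dx) (hy : ny = y + dy)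
    (P : List (Int × Int × Int)) (N : List (Int × Int)) (vis : PySem.Set (Int × Int)) :
    bfsStepA fav_num x y d (P ++ N.map (fun c => (c.1, c.2, d + 1)), vis) (dx, dy)
    = (P ++ ((stepCell fav_num (N, vis) (nx, ny)).1.map (fun c => (c.1, c.2, d + 1))),
        (stepCell fav_num (N, vis) (nx, ny)).2) := by
  subst hx hy
  simp only [bfsStepA, stepCell]
  by_cases h1 : x + dx < 0 ∨ y + dy < 0
  · have h1' : ¬ (open_ok fav_num (x + dx, y + dy) = true ∧ ¬ ((x + dx, y + dy) ∈ vis)) := by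
      intro hc
      exact ((wall_open fav_num (x + dx) (y + dy)).1 hc.1).1 h1
    simp [h1, h1']
  · by_cases h2 : (x + dx, y + dy) ∈ vis
    · simp [h1, h2]
    · by_cases h3 : is_wall (x + dx) (y + dy) fav_num = true
      · have h3' : ¬ open_ok fav_num (x + dx, y + dy) = true := by
          intro hc
          exact ((wall_open fav_num (x + dx) (y + dy)).1 hc).2 h3
        simp [h1, h2, h3, h3']
      · have h3' : open_ok fav_num (x + dx, y + dy) = true :=
          (wall_open fav_num (x + dx) (y + dy)).2 ⟨h1, h3⟩
        simp [h1, h2, h3, h3']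

-- A's whole four-neighbour expansion of one popped cell, through expandCell
theorem expand_rel (fav_num x y d : Int) (P : List (Int × Int × Int))
    (N : List (Int × Int)) (vis : PySem.Set (Int × Int)) :
    List.foldl (bfsStepA fav_num x y d) (P ++ N.map (fun c => (c.1, c.2, d + 1)), vis)
      [((0:Int), (1:Int)), (0, -1), (1, 0), (-1, 0)]
    = (P ++ ((expandCell fav_num (N, vis) (x, y)).1.map (fun c => (c.1, c.2, d + 1))),
        (expandCell fav_num (N, vis) (x, y)).2) := by
  simp only [expandCell, nbrs, List.foldl_cons, List.foldl_nil]
  rw [step_rel fav_num x y d 0 1 x (y + 1) (by ring) (by ring),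
      step_rel fav_num x y d 0 (-1) x (y - 1) (by ring) (by ring),
      step_rel fav_num x y d 1 0 (x + 1) y (by ring) (by ring),
      step_rel fav_num x y d (-1) 0 (x - 1) y (by ring) (by ring)]

-- A processes one whole level: returns curd iff the target is in the level list,
-- otherwise continues on the accumulated next level
theorem levelA_eq (fav_num tx ty : Int) (fuel : Nat) (d : Int) :
    ∀ (L N : List (Int × Int)) (vis : PySem.Set (Int × Int)),
    bfsLoopA fav_num tx ty fuel d
        (L.map (fun c => (c.1, c.2, d)) ++ N.map (fun c => (c.1, c.2, d + 1))) vis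
    = if (tx, ty) ∈ L then d
      else bfsLoopA fav_num tx ty fuel d
        ((L.foldl (expandCell fav_num) (N, vis)).1.map (fun c => (c.1, c.2, d + 1)))
        (L.foldl (expandCell fav_num) (N, vis)).2 := by
  intro L
  induction L with
  | nil => intro N vis; simp
  | cons c L ih =>
    intro N vis
    rw [List.map_cons, List.cons_append, bfsLoopA.eq_def]
    dsimp only
    rw [dif_pos rfl]
    by_cases ht : c.1 = tx ∧ c.2 = ty
    · have hc : c = (tx, ty) := Prod.ext ht.1 ht.2
      simp [hc]
    · have hc : ¬ c = (tx, ty) := by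
        intro h; exact ht ⟨by rw [h], by rw [h]⟩
      rw [if_neg ht]
      rw [expand_rel fav_num c.1 c.2 d (L.map (fun c => (c.1, c.2, d))) N vis]
      rw [ih (expandCell fav_num (N, vis) c).1 (expandCell fav_num (N, vis) c).2]
      have hc' : ¬ ((tx, ty) = c) := fun h => hc h.symm
      simp [hc']

-- membership characterisation of a stepCell fold over a candidate list
theorem foldStep_char (fav_num : Int) (ns : List (Int × Int)) :
    ∀ (N : List (Int × Int)) (vis : PySem.Set (Int × Int)) (z : Int × Int),
      (z ∈ (List.foldl (stepCell fav_num) (N, vis) ns).2 ↔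
        z ∈ vis ∨ (z ∈ ns ∧ open_ok fav_num z = true)) ∧
      (z ∈ (List.foldl (stepCell fav_num) (N, vis) ns).1 ↔
        z ∈ N ∨ (z ∉ vis ∧ z ∈ ns ∧ open_ok fav_num z = true)) := by
  induction ns with
  | nil => intro N vis z; simp
  | cons n ns ih =>
    intro N vis z
    rw [List.foldl_cons]
    rcases hp : stepCell fav_num (N, vis) n with ⟨N', vis'⟩
    have h2 : ∀ w, w ∈ vis' ↔ w ∈ vis ∨ (open_ok fav_num n = true ∧ w = n) := by
      intro w
      have : w ∈ (stepCell fav_num (N, vis) n).2 ↔ w ∈ vis ∨ (open_ok fav_num n = true ∧ w = n) := by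
        simp only [stepCell]
        split_ifs with h
        · simp only [PySem.Set.mem_add]
          by_cases hw : w = n
          · subst hw; tauto
          · tauto
        · by_cases hw : w = n
          · subst hw; tauto
          · tauto
      rwa [hp] at this
    have h1 : ∀ w, w ∈ N' ↔ w ∈ N ∨ (w ∉ vis ∧ open_ok fav_num n = true ∧ w = n) := by
      intro w
      have : w ∈ (stepCell fav_num (N, vis) n).1 ↔
          w ∈ N ∨ (w ∉ vis ∧ open_ok fav_num n = true ∧ w = n) := by
        simp only [stepCell]
        split_ifs with h
        · simp only [List.mem_append, List.mem_singleton]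
          by_cases hw : w = n
          · subst hw; tauto
          · tauto
        · by_cases hw : w = n
          · subst hw; tauto
          · tauto
      rwa [hp] at this
    obtain ⟨i2, i1⟩ := ih N' vis' z
    rw [i2, i1, h2 z, h1 z, List.mem_cons]
    by_cases hz : z = n
    · subst hz; tauto
    · simp only [hz, and_false, false_or, or_false]
      tauto

-- membership characterisation of a whole-level expandCell fold
theorem levelFold_char (fav_num : Int) (L : List (Int × Int)) :
    ∀ (N : List (Int × Int)) (vis : PySem.Set (Int × Int)) (z : Int × Int),
      (z ∈ (L.foldl (expandCell fav_num) (N, vis)).2 ↔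
        z ∈ vis ∨ (∃ c ∈ L, z ∈ nbrs c ∧ open_ok fav_num z = true)) ∧
      (z ∈ (L.foldl (expandCell fav_num) (N, vis)).1 ↔
        z ∈ N ∨ (z ∉ vis ∧ ∃ c ∈ L, z ∈ nbrs c ∧ open_ok fav_num z = true)) := by
  induction L with
  | nil => intro N vis z; simp
  | cons c L ih =>
    intro N vis z
    rw [List.foldl_cons]
    show (z ∈ (List.foldl (expandCell fav_num) (expandCell fav_num (N, vis) c) L).2 ↔ _) ∧ _
    rcases hp : expandCell fav_num (N, vis) c with ⟨N', vis'⟩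
    have hc := foldStep_char fav_num (nbrs c) N vis z
    rw [show List.foldl (stepCell fav_num) (N, vis) (nbrs c) = expandCell fav_num (N, vis) c from rfl, hp] at hc
    obtain ⟨hc2, hc1⟩ := hc
    obtain ⟨i2, i1⟩ := ih N' vis' z
    rw [i2, i1, hc2, hc1]
    constructor
    · constructor
      · rintro ((hv | hn) | ⟨c', hc', hz⟩)
        · exact Or.inl hv
        · exact Or.inr ⟨c, List.mem_cons_self .., hn⟩
        · exact Or.inr ⟨c', List.mem_cons_of_mem _ hc', hz⟩
      · rintro (hv | ⟨c', hc', hz⟩)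
        · exact Or.inl (Or.inl hv)
        · rcases List.mem_cons.1 hc' with h | h
          · exact Or.inl (Or.inr (h ▸ hz))
          · exact Or.inr ⟨c', h, hz⟩
    · constructor
      · rintro ((hN | ⟨hv, hn⟩) | ⟨hv', c', hc', hz⟩)
        · exact Or.inl hN
        · exact Or.inr ⟨hv, c, List.mem_cons_self .., hn⟩
        · refine Or.inr ⟨fun hv => hv' (Or.inl hv), c', List.mem_cons_of_mem _ hc', hz⟩
      · rintro (hN | ⟨hv, c', hc', hz⟩)
        · exact Or.inl (Or.inl hN)
        · rcases List.mem_cons.1 hc' with h | h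
          · exact Or.inl (Or.inr ⟨hv, h ▸ hz⟩)
          · by_cases hv' : z ∈ vis ∨ (z ∈ nbrs c ∧ open_ok fav_num z = true)
            · rcases hv' with h' | h'
              · exact absurd h' hv
              · exact Or.inl (Or.inr ⟨hv, h'⟩)
            · exact Or.inr ⟨hv', c', h, hz⟩

-- membership characterisation of B's set comprehension
theorem open_neighbours_char (fav_num : Int) (F : PySem.Set (Int × Int)) (z : Int × Int) :
    z ∈ open_neighbours fav_num F ↔ ∃ c ∈ F, z ∈ nbrs c ∧ open_ok fav_num z = true := by
  have inner : ∀ (ns : List (Int × Int)) (s : PySem.Set (Int × Int)),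
      z ∈ List.foldl (fun s n => if open_ok fav_num n then PySem.Set.add s n else s) s ns ↔
        z ∈ s ∨ (z ∈ ns ∧ open_ok fav_num z = true) := by
    intro ns
    induction ns with
    | nil => intro s; simp
    | cons n ns ih =>
      intro s
      rw [List.foldl_cons, ih]
      split_ifs with h
      · simp only [PySem.Set.mem_add, List.mem_cons]
        by_cases hz : z = n
        · subst hz; tauto
        · simp only [hz, or_false, false_or]
      · simp only [List.mem_cons]
        by_cases hz : z = n
        · subst hz; tauto
        · simp only [hz, false_or]
  have outer : ∀ (l : List (Int × Int)) (s : PySem.Set (Int × Int)),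
      z ∈ List.foldl
          (fun s c => (nbrs c).foldl
            (fun s n => if open_ok fav_num n then PySem.Set.add s n else s) s) s l ↔
        z ∈ s ∨ (∃ c ∈ l, z ∈ nbrs c ∧ open_ok fav_num z = true) := by
    intro l
    induction l with
    | nil => intro s; simp
    | cons c l ih =>
      intro s
      rw [List.foldl_cons, ih, inner]
      simp only [List.mem_cons]
      constructor
      · rintro ((hs | hn) | ⟨c', hc', hz⟩)
        · exact Or.inl hs
        · exact Or.inr ⟨c, Or.inl rfl, hn⟩
        · exact Or.inr ⟨c', Or.inr hc', hz⟩
      · rintro (hs | ⟨c', (h | h), hz⟩)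
        · exact Or.inl (Or.inl hs)
        · exact Or.inl (Or.inr (h ▸ hz))
        · exact Or.inr ⟨c', h, hz⟩
  exact (outer F PySem.Set.empty).trans (by simp [PySem.Set.empty])


-- unfolding helpers for the two loops
theorem loopA_nil (fav_num tx ty : Int) (fuel : Nat) (curd : Int)
    (vis : PySem.Set (Int × Int)) :
    bfsLoopA fav_num tx ty fuel curd [] vis = -1 := by
  rw [bfsLoopA.eq_def]

theorem loopA_shift_zero (fav_num tx ty curd x y d : Int)
    (rest : List (Int × Int × Int)) (vis : PySem.Set (Int × Int)) (h : ¬ d = curd) :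
    bfsLoopA fav_num tx ty 0 curd ((x, y, d) :: rest) vis = -1 := by
  rw [bfsLoopA.eq_def]
  simp [h]

theorem loopA_shift_succ (fav_num tx ty curd x y d : Int) (f : Nat)
    (rest : List (Int × Int × Int)) (vis : PySem.Set (Int × Int)) (h : ¬ d = curd) :
    bfsLoopA fav_num tx ty (f + 1) curd ((x, y, d) :: rest) vis
      = bfsLoopA fav_num tx ty f d ((x, y, d) :: rest) vis := by
  rw [bfsLoopA.eq_def]
  simp [h]

-- the two frontier descriptions generate the same neighbour predicate
theorem gen_congr (fav_num : Int) (L : List (Int × Int)) (F : PySem.Set (Int × Int))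
    (hR1 : ∀ z, z ∈ L ↔ z ∈ F) (z : Int × Int) :
    (∃ c ∈ L, z ∈ nbrs c ∧ open_ok fav_num z = true)
      ↔ (∃ c ∈ F, z ∈ nbrs c ∧ open_ok fav_num z = true) := by
  constructor
  · rintro ⟨c, hc, h⟩; exact ⟨c, (hR1 c).1 hc, h⟩
  · rintro ⟨c, hc, h⟩; exact ⟨c, (hR1 c).2 hc, h⟩

-- the bisimulation at level starts: A's level list L and B's frontier F have the same
-- members, and A's visited is B's seen ∪ frontier
theorem loop_rel (fav_num tx ty : Int) : ∀ (fuel : Nat) (L : List (Int × Int))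
    (F seen vis : PySem.Set (Int × Int)) (dist : Int),
    (∀ z, z ∈ L ↔ z ∈ F) → (∀ z, z ∈ vis ↔ z ∈ seen ∨ z ∈ F) →
    bfsLoopA fav_num tx ty fuel dist (L.map (fun c => (c.1, c.2, dist))) vis
      = bfsLoopB fav_num tx ty fuel seen F dist := by
  intro fuel
  induction fuel with
  | zero =>
    intro L F seen vis dist hR1 hR2
    have hA := levelA_eq fav_num tx ty 0 dist L [] vis
    simp only [List.map_nil, List.append_nil] at hA
    rw [hA, bfsLoopB.eq_def]
    dsimp only
    by_cases hT : (tx, ty) ∈ L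
    · have hF : (tx, ty) ∈ F := (hR1 _).1 hT
      have hne : F.isEmpty = false := by
        cases F with
        | nil => simp at hF
        | cons a t => rfl
      have hcont : PySem.Set.contains F (tx, ty) = true := by
        simpa [PySem.Set.contains_iff] using hF
      rw [if_pos hT, if_neg (by simp [hne]), if_pos hcont]
    · rw [if_neg hT]
      by_cases hL : L = []
      · subst hL
        have hFnil : F = [] := List.eq_nil_iff_forall_not_mem.2 fun z hz => by
          simpa using (hR1 z).2 hz
        subst hFnil
        simp [loopA_nil]
      · have hc0 : L.head hL ∈ F := (hR1 _).1 (List.head_mem hL)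
        have hne : F.isEmpty = false := by
          cases F with
          | nil => simp at hc0
          | cons a t => rfl
        have hcont : PySem.Set.contains F (tx, ty) = false := by
          simp only [PySem.Set.contains_eq_listContains, List.contains_eq_mem,
            decide_eq_false_iff_not]
          exact fun h => hT ((hR1 _).2 h)
        simp only [hne, Bool.false_eq_true, if_false, hcont]
        rcases hE1 : (L.foldl (expandCell fav_num) ([], vis)).1 with _ | ⟨c, N⟩
        · rw [List.map_nil, loopA_nil]
        · rw [List.map_cons,
            loopA_shift_zero fav_num tx ty dist c.1 c.2 (dist + 1) _ _ (by omega)]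
  | succ f ih =>
    intro L F seen vis dist hR1 hR2
    have hA := levelA_eq fav_num tx ty (f + 1) dist L [] vis
    simp only [List.map_nil, List.append_nil] at hA
    rw [hA, bfsLoopB.eq_def]
    dsimp only
    by_cases hT : (tx, ty) ∈ L
    · have hF : (tx, ty) ∈ F := (hR1 _).1 hT
      have hne : F.isEmpty = false := by
        cases F with
        | nil => simp at hF
        | cons a t => rfl
      have hcont : PySem.Set.contains F (tx, ty) = true := by
        simpa [PySem.Set.contains_iff] using hF
      rw [if_pos hT, if_neg (by simp [hne]), if_pos hcont]
    · rw [if_neg hT]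
      by_cases hL : L = []
      · subst hL
        have hFnil : F = [] := List.eq_nil_iff_forall_not_mem.2 fun z hz => by
          simpa using (hR1 z).2 hz
        subst hFnil
        simp [loopA_nil]
      · have hc0 : L.head hL ∈ F := (hR1 _).1 (List.head_mem hL)
        have hne : F.isEmpty = false := by
          cases F with
          | nil => simp at hc0
          | cons a t => rfl
        have hcont : PySem.Set.contains F (tx, ty) = false := by
          simp only [PySem.Set.contains_eq_listContains, List.contains_eq_mem,
            decide_eq_false_iff_not]
          exact fun h => hT ((hR1 _).2 h)
        simp only [hne, Bool.false_eq_true, if_false, hcont]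
        -- the next-level states are related
        have hch := levelFold_char fav_num L ([] : List (Int × Int)) vis
        have hON := open_neighbours_char fav_num F
        have hR1' : ∀ z, z ∈ (L.foldl (expandCell fav_num) ([], vis)).1 ↔
            z ∈ PySem.Set.diff (open_neighbours fav_num F) (PySem.Set.union seen F) := by
          intro z
          rw [(hch z).2, PySem.Set.mem_diff, hON z, ← gen_congr fav_num L F hR1 z,
            PySem.Set.mem_union, ← hR2 z]
          simp only [List.not_mem_nil, false_or]
          tauto
        have hR2' : ∀ z, z ∈ (L.foldl (expandCell fav_num) ([], vis)).2 ↔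
            z ∈ PySem.Set.union seen F ∨
              z ∈ PySem.Set.diff (open_neighbours fav_num F) (PySem.Set.union seen F) := by
          intro z
          rw [(hch z).1, PySem.Set.mem_diff, hON z, ← gen_congr fav_num L F hR1 z,
            PySem.Set.mem_union, ← hR2 z]
          tauto
        rcases hE1 : (L.foldl (expandCell fav_num) ([], vis)).1 with _ | ⟨c, N⟩
        · rw [List.map_nil, loopA_nil]
          have hFnil : PySem.Set.diff (open_neighbours fav_num F) (PySem.Set.union seen F) = [] :=
            List.eq_nil_iff_forall_not_mem.2 fun z hz => by
              have := (hR1' z).2 hz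
              rw [hE1] at this
              simp at this
          rw [bfsLoopB.eq_def, hFnil]
          simp
        · rw [List.map_cons, loopA_shift_succ fav_num tx ty dist c.1 c.2 (dist + 1) f _ _
            (by omega)]
          have := ih (L.foldl (expandCell fav_num) ([], vis)).1
            (PySem.Set.diff (open_neighbours fav_num F) (PySem.Set.union seen F))
            (PySem.Set.union seen F)
            (L.foldl (expandCell fav_num) ([], vis)).2 (dist + 1) hR1' hR2'
          rw [hE1, List.map_cons] at this
          exact this

-- ===== VERDICT (by name: the statement is the Claim_ definition above) =====
theorem solve_bfs_spec : Claim_equal_solve_bfs := by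
  intro fav tx ty _
  unfold Spec_solve_bfs solve_bfs solve_bfs_alt
  have := loop_rel fav tx ty 4294967296 [((1:Int), (1:Int))]
    (PySem.Set.ofList [((1:Int), (1:Int))]) PySem.Set.empty
    (PySem.Set.ofList [((1:Int), (1:Int))]) 0 (by simp [PySem.Set.ofList])
    (by simp [PySem.Set.ofList, PySem.Set.empty])
  simpa using this
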